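-- pv_equiv track=rewrite | github.com/webclinic017/trading-spy-iron-condor | scripts/agent_workflow_toolkit.py | _compress_repeated_lines
-- ===== SOURCE A (Python) =====
-- def _compress_repeated_lines(lines: list[str]) -> list[str]:
--     if not lines:
--         return []
--
--     compressed: list[str] = []
--     current = lines[0]
--     count = 1
--     for line in lines[1:]:
--         if line == current:
--             count += 1
--             continue
--         compressed.append(f"{current} (x{count})" if count > 1 else current)
--         current = line
--         count = 1
--     compressed.append(f"{current} (x{count})" if count > 1 else current)
--     return compressed
-- ===== SOURCE B (Python) =====
-- def _compress_repeated_lines(lines: list[str]) -> list[str]: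
--     # Stage 1: find the start index of every maximal run of equal lines.
--     n = len(lines)
--     bounds = [i for i in range(n) if i == 0 or lines[i] != lines[i - 1]]
--     bounds.append(n)
--     # Stage 2: format each run from its (start, end) index pair.
--     return [
--         f"{lines[s]} (x{e - s})" if e - s > 1 else lines[s]
--         for s, e in zip(bounds, bounds[1:])
--     ]
-- ===== Notes on version B (the rewrite author's own statement) =====
-- stated objective: alternative
-- what changed: Replaces A's single-pass current/count accumulator loop with a staged index-based algorithm: first compute the list of run-boundary indices where a line differs from its predecessor, then format each run from consecutive (start, end) boundary pairs.
import Mathlib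
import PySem

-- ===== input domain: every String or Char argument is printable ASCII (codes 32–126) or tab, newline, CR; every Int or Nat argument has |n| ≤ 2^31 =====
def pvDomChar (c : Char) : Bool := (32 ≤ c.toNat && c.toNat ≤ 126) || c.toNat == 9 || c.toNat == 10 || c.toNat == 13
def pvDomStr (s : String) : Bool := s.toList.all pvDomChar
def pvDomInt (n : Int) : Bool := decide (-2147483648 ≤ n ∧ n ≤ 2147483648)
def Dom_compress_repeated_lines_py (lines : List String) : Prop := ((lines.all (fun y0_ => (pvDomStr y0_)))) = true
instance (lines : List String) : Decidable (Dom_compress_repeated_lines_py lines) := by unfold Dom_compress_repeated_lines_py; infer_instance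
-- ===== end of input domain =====

-- B replaces A's single-pass current/count accumulator loop with a staged index-based
-- algorithm: first compute run-boundary indices, then format each (start, end) pair
-- (alternative decomposition; same O(n) cost).

-- ===== PORT A =====
-- f"{current} (x{count})" if count > 1 else current
def pvEmitA (current : String) (count : Int) : String :=
  if count > 1 then current ++ " (x" ++ PySem.Int.toStr count ++ ")" else current

-- the 'for line in lines[1:]' loop, state = (compressed, current, count)
def pvLoopA (compressed : List String) (current : String) (count : Int) : List String → List String
  | [] => compressed ++ [pvEmitA current count]
  | line :: rest =>
    if line = current then pvLoopA compressed current (count + 1) rest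
    else pvLoopA (compressed ++ [pvEmitA current count]) line 1 rest

def compress_repeated_lines_py (lines : List String) : List String :=
  match lines with
  | [] => []
  | l0 :: rest => pvLoopA [] l0 1 rest

-- ===== PORT B =====
-- the comprehension condition 'i == 0 or lines[i] != lines[i - 1]'
-- (indices come from range(n), so lines[i] and, when i ≥ 1, lines[i-1] are in range: getD is exact)
def pvIsStart (lines : List String) (i : Nat) : Bool :=
  i == 0 || !(lines.getD i "" == lines.getD (i - 1) "")

-- f"{lines[s]} (x{e - s})" if e - s > 1 else lines[s]
def pvFmt (lines : List String) (p : Nat × Nat) : String :=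
  if ((p.2 : Int) - (p.1 : Int)) > 1 then
    lines.getD p.1 "" ++ " (x" ++ PySem.Int.toStr ((p.2 : Int) - (p.1 : Int)) ++ ")"
  else lines.getD p.1 ""

-- bounds = [i for i in range(n) if …]; bounds.append(n); [… for s, e in zip(bounds, bounds[1:])]
def compress_repeated_lines_py_alt (lines : List String) : List String :=
  let bounds := (List.range lines.length).filter (pvIsStart lines)
  let b := bounds ++ [lines.length]
  (b.zip (b.drop 1)).map (pvFmt lines)

-- ===== PRECONDITION & SPEC =====
def Spec_compress_repeated_lines_py (lines : List String) (out : List String) : Prop := out = compress_repeated_lines_py_alt lines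
instance (lines : List String) (out : List String) : Decidable (Spec_compress_repeated_lines_py lines out) := by unfold Spec_compress_repeated_lines_py; infer_instance

-- ===== CLAIM (what is proved, stated in full; the proofs are below) =====
def Claim_equal_compress_repeated_lines_py : Prop := ∀ (lines : List String), Dom_compress_repeated_lines_py lines → Spec_compress_repeated_lines_py lines (compress_repeated_lines_py lines)

-- ===== LEMMAS AND PROOFS =====

-- boundary indices of a tail, written structurally with an absolute offset
def pvBAux (prev : String) (off : Nat) : List String → List Nat
  | [] => []
  | x :: xs => if x = prev then pvBAux x (off + 1) xs else off :: pvBAux x (off + 1) xs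

theorem pvBAux_shift (l : List String) : ∀ (prev : String) (off k : Nat),
    pvBAux prev (off + k) l = (pvBAux prev off l).map (· + k) := by
  induction l with
  | nil => intro prev off k; simp [pvBAux]
  | cons x xs ih =>
    intro prev off k
    by_cases h : x = prev
    · simp only [pvBAux, if_pos h]
      rw [show off + k + 1 = (off + 1) + k from by omega, ih]
    · simp only [pvBAux, if_neg h, List.map_cons]
      rw [show off + k + 1 = (off + 1) + k from by omega, ih]

theorem pvBounds_core : ∀ (tl : List String) (a : String) (off : Nat),
    ((List.range tl.length).filter
        (fun i => !(tl.getD i "" == (a :: tl).getD i ""))).map (· + off)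
      = pvBAux a off tl := by
  intro tl
  induction tl with
  | nil => intro a off; simp [pvBAux]
  | cons x xs ih =>
    intro a off
    rw [show (x :: xs).length = xs.length + 1 from rfl, List.range_succ_eq_map]
    rw [List.filter_cons]
    have hcomp : ((fun i => !((x :: xs).getD i "" == (a :: x :: xs).getD i "")) ∘ Nat.succ)
        = fun i => !(xs.getD i "" == (x :: xs).getD i "") := by
      funext i
      simp [Function.comp]
    rw [List.filter_map, hcomp]
    have hmap : ∀ (L : List Nat), (L.map Nat.succ).map (· + off) = L.map (· + (off + 1)) := by
      intro L
      rw [List.map_map]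
      apply List.map_congr_left
      intro i _
      simp [Function.comp]
      omega
    by_cases h : x = a
    · have hc : (!((x :: xs).getD 0 "" == (a :: x :: xs).getD 0 "")) = false := by
        simp [h]
      rw [hc]
      simp only [Bool.false_eq_true, reduceIte]
      rw [hmap, ih x (off + 1)]
      simp [pvBAux, h]
    · have hc : (!((x :: xs).getD 0 "" == (a :: x :: xs).getD 0 "")) = true := by
        simp
        exact fun hx => h (by exact hx)
      rw [hc]
      simp only [reduceIte, List.map_cons]
      rw [hmap, ih x (off + 1)]
      simp [pvBAux, h]

theorem pvBounds_cons (a : String) (tl : List String) :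
    (List.range (a :: tl).length).filter (pvIsStart (a :: tl)) = 0 :: pvBAux a 1 tl := by
  rw [show (a :: tl).length = tl.length + 1 from rfl, List.range_succ_eq_map, List.filter_cons]
  have h0 : pvIsStart (a :: tl) 0 = true := by simp [pvIsStart]
  rw [h0]
  simp only [reduceIte]
  have hcomp : (pvIsStart (a :: tl) ∘ Nat.succ)
      = fun i => !(tl.getD i "" == (a :: tl).getD i "") := by
    funext i
    simp [pvIsStart, Function.comp]
  rw [List.filter_map, hcomp]
  have hmap : (((List.range tl.length).filter
      (fun i => !(tl.getD i "" == (a :: tl).getD i ""))).map Nat.succ)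
      = ((List.range tl.length).filter
      (fun i => !(tl.getD i "" == (a :: tl).getD i ""))).map (· + 1) := by
    apply List.map_congr_left; intro i _; omega
  rw [hmap, pvBounds_core]

theorem pvBAux_run : ∀ (run rest : List String) (prev : String) (off : Nat),
    (∀ x ∈ run, x = prev) →
    pvBAux prev off (run ++ rest) = pvBAux prev (off + run.length) rest := by
  intro run
  induction run with
  | nil => intro rest prev off _; simp
  | cons x xs ih =>
    intro rest prev off h
    have hx : x = prev := h x (by simp)
    simp only [List.cons_append, pvBAux, if_pos hx]
    subst hx
    rw [ih rest x (off + 1) (fun y hy => h y (by simp [hy]))]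
    congr 1
    simp [List.length_cons]
    omega

theorem pvGetD_append (l1 : List String) : ∀ (l2 : List String) (s : Nat),
    (l1 ++ l2).getD (l1.length + s) "" = l2.getD s "" := by
  induction l1 with
  | nil => intro l2 s; simp
  | cons a l1 ih =>
    intro l2 s
    rw [show (a :: l1).length + s = (l1.length + s) + 1 from by simp; omega]
    rw [List.cons_append, List.getD_cons_succ, ih]

theorem pvAlt_nil : compress_repeated_lines_py_alt [] = [] := rfl

theorem pvDropWhile_head (p : String → Bool) : ∀ (l : List String) (y : String) (ys : List String),
    l.dropWhile p = y :: ys → p y = false := by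
  intro l
  induction l with
  | nil => intro y ys h; simp at h
  | cons x xs ih =>
    intro y ys h
    by_cases hx : p x = true
    · rw [List.dropWhile_cons_of_pos hx] at h
      exact ih y ys h
    · rw [List.dropWhile_cons_of_neg hx] at h
      cases h
      simpa using hx

theorem pvFmt_head (key : String) (tl : List String) (c : Nat) :
    pvFmt (key :: tl) (0, c) = pvEmitA key (c : Int) := by
  simp [pvFmt, pvEmitA]

theorem pvFmt_shift (key : String) (run rest : List String) (p : Nat × Nat) :
    pvFmt ((key :: run) ++ rest) (p.1 + (run.length + 1), p.2 + (run.length + 1)) = pvFmt rest p := by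
  have hget : ((key :: run) ++ rest).getD (p.1 + (run.length + 1)) "" = rest.getD p.1 "" := by
    rw [show p.1 + (run.length + 1) = (key :: run).length + p.1 from by simp; omega]
    exact pvGetD_append (key :: run) rest p.1
  have hsub : ((p.2 + (run.length + 1) : Nat) : Int) - ((p.1 + (run.length + 1) : Nat) : Int)
      = (p.2 : Int) - (p.1 : Int) := by push_cast; ring
  simp only [pvFmt, hget, hsub]

-- B on a nonempty list = emit the first maximal run, then B on the remainder
theorem pvAlt_run (key : String) (tl : List String) :
    compress_repeated_lines_py_alt (key :: tl) =
      pvEmitA key (1 + ((tl.takeWhile (· = key)).length : Int)) ::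
        compress_repeated_lines_py_alt (tl.dropWhile (· = key)) := by
  have htl : tl.takeWhile (· = key) ++ tl.dropWhile (· = key) = tl :=
    List.takeWhile_append_dropWhile
  set run := tl.takeWhile (· = key) with hrun
  set rest := tl.dropWhile (· = key) with hrest
  have hall : ∀ x ∈ run, x = key := by
    intro x hx
    have := List.mem_takeWhile_imp hx
    exact of_decide_eq_true this
  have hb : (List.range (key :: tl).length).filter (pvIsStart (key :: tl))
      = 0 :: pvBAux key (1 + run.length) rest := by
    rw [pvBounds_cons, ← htl, pvBAux_run run rest key 1 hall]
  have hlen : tl.length = run.length + rest.length := by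
    rw [← htl]; simp
  cases hre : rest with
  | nil =>
    rw [hre] at hb hlen
    simp only [List.length_nil, Nat.add_zero] at hlen
    have halt : compress_repeated_lines_py_alt (key :: tl)
        = [pvFmt (key :: tl) (0, (key :: tl).length)] := by
      simp only [compress_repeated_lines_py_alt]
      rw [hb]
      simp [pvBAux]
    rw [halt, pvAlt_nil]
    have hone : pvFmt (key :: tl) (0, (key :: tl).length) = pvEmitA key (1 + (run.length : Int)) := by
      rw [pvFmt_head]
      congr 1
      simp only [List.length_cons, hlen]
      push_cast
      ring
    rw [hone]
  | cons y ys =>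
    have hdw : tl.dropWhile (fun x => decide (x = key)) = y :: ys := hrest.symm.trans hre
    have hy : ¬ (y = key) := by
      have h := pvDropWhile_head (fun x => decide (x = key)) tl y ys hdw
      simpa using h
    rw [hre] at hb
    simp only [pvBAux, if_neg hy] at hb
    have hshift : pvBAux y (1 + run.length + 1) ys
        = (pvBAux y 1 ys).map (· + (run.length + 1)) := by
      rw [show 1 + run.length + 1 = 1 + (run.length + 1) from by omega]
      exact pvBAux_shift ys y 1 (run.length + 1)
    have hn : (key :: tl).length = rest.length + (run.length + 1) := by
      simp [hlen, hre]; omega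
    -- b of (key :: tl) equals 0 :: (b of rest, shifted by run.length + 1)
    have hbfull :
        ((List.range (key :: tl).length).filter (pvIsStart (key :: tl)) ++ [(key :: tl).length])
        = 0 :: (((List.range rest.length).filter (pvIsStart rest) ++ [rest.length]).map
            (· + (run.length + 1))) := by
      rw [hb, hshift, hn, hre, pvBounds_cons]
      simp
      omega
    set b' := (List.range rest.length).filter (pvIsStart rest) ++ [rest.length] with hb'
    obtain ⟨t', ht'⟩ : ∃ t', b' = 0 :: t' := by
      rw [hb', hre, pvBounds_cons]; exact ⟨_, rfl⟩
    have halt : compress_repeated_lines_py_alt (key :: tl)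
        = ((0 :: b'.map (· + (run.length + 1))).zip (b'.map (· + (run.length + 1)))).map
            (pvFmt (key :: tl)) := by
      simp only [compress_repeated_lines_py_alt]
      rw [hbfull]
      rfl
    have halt_rest : compress_repeated_lines_py_alt rest
        = (b'.zip t').map (pvFmt rest) := by
      simp only [compress_repeated_lines_py_alt, ← hb']
      rw [show b'.drop 1 = t' from by rw [ht']; rfl]
    rw [← hre, halt, halt_rest, ht']
    simp only [List.map_cons, List.zip_cons_cons]
    congr 1
    · rw [show (0 : Nat) + (run.length + 1) = run.length + 1 from by omega, pvFmt_head]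
      congr 1
      push_cast; ring
    · rw [show ((0 + (run.length + 1)) :: List.map (fun x => x + (run.length + 1)) t')
            = List.map (fun x => x + (run.length + 1)) (0 :: t') from rfl]
      rw [List.zip_map, List.map_map]
      apply List.map_congr_left
      intro p _
      have hkt : key :: tl = (key :: run) ++ rest := by rw [← htl]; rfl
      rw [Function.comp_apply, hkt]
      have := pvFmt_shift key run rest p
      simpa [Prod.map] using this

-- the accumulator distributes out of A's loop
theorem pvLoopA_acc (rest : List String) : ∀ (acc : List String) (c : String) (k : Int),
    pvLoopA acc c k rest = acc ++ pvLoopA [] c k rest := by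
  induction rest with
  | nil => intro acc c k; simp [pvLoopA]
  | cons l tl ih =>
    intro acc c k
    by_cases h : l = c
    · subst h
      simp only [pvLoopA]
      apply ih
    · simp only [pvLoopA, if_neg h]
      rw [ih (acc ++ [pvEmitA c k]), ih ([] ++ [pvEmitA c k])]
      simp

-- A's loop started mid-run equals: finish the current run, then B on the remainder
theorem pvLoopA_runs (rest : List String) : ∀ (c : String) (k : Int),
    pvLoopA [] c k rest =
      pvEmitA c (k + ((rest.takeWhile (· = c)).length : Int)) ::
        compress_repeated_lines_py_alt (rest.dropWhile (· = c)) := by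
  induction rest with
  | nil =>
    intro c k
    simp [pvLoopA, pvAlt_nil]
  | cons l tl ih =>
    intro c k
    by_cases h : l = c
    · subst h
      simp only [pvLoopA, List.takeWhile_cons, List.dropWhile_cons,
        decide_true, if_true, List.length_cons]
      rw [ih]
      congr 2
      push_cast; ring
    · simp only [pvLoopA, List.takeWhile_cons, List.dropWhile_cons,
        decide_eq_true_eq, if_neg h]
      rw [pvLoopA_acc, ih, pvAlt_run]
      simp

-- ===== VERDICT (by name: the statement is the Claim_ definition above) =====
theorem compress_repeated_lines_py_spec : Claim_equal_compress_repeated_lines_py := by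
  intro lines _
  unfold Spec_compress_repeated_lines_py
  cases lines with
  | nil =>
    show compress_repeated_lines_py [] = compress_repeated_lines_py_alt []
    rw [show compress_repeated_lines_py [] = [] from rfl, pvAlt_nil]
  | cons l0 rest =>
    show pvLoopA [] l0 1 rest = compress_repeated_lines_py_alt (l0 :: rest)
    rw [pvLoopA_runs, pvAlt_run]
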